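-- pv_equiv track=rewrite | github.com/Nama21yo/NatnaelHackerrank | premium_questions/sliding_window/unique_flavors_candies_2107.py | unique_flavors
-- ===== SOURCE A (Python) =====
-- from collections import defaultdict
--
-- def unique_flavors(candies, k):
--     count_unique = defaultdict(int)
--     n = len(candies)
--     for i in range(n):
--         count_unique[candies[i]] += 1
--
--     l = 0
--     max_flavor = 0
--     for r in range(n):
--         count_unique[candies[r]] -= 1
--         if count_unique[candies[r]] == 0:
--             count_unique.pop(candies[r])
--         if r - l + 1 > k:
--             count_unique[candies[l]] += 1
--             l += 1
--         if r - l + 1 == k: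
--             max_flavor = max(max_flavor, len(count_unique))
--     return max_flavor
-- ===== SOURCE B (Python) =====
-- def unique_flavors(candies, k):
--     n = len(candies)
--     if k < 0 or k > n:
--         return 0
--     best = 0
--     for s in range(n - k + 1):
--         flavors = set(candies[:s]) | set(candies[s + k:])
--         best = max(best, len(flavors))
--     return best
-- ===== Notes on version B (the rewrite author's own statement) =====
-- stated objective: simpler
-- what changed: Replaces the incremental sliding-window Counter maintenance with a direct brute force: for each window start s, recompute the distinct flavors of the complement via set(candies[:s]) | set(candies[s+k:]), with a plain guard returning 0 when k < 0 or k > len(candies).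
import Mathlib
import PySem

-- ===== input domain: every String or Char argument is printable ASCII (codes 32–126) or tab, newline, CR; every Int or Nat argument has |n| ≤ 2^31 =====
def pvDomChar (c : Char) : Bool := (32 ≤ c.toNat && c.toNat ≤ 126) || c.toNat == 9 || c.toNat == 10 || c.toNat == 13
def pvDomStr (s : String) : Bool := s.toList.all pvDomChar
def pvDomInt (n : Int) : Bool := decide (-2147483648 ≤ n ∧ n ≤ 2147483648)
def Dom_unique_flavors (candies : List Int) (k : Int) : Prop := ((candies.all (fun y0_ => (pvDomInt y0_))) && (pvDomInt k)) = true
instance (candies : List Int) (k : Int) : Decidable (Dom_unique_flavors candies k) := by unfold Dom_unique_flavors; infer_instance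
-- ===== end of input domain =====

-- B replaces the incremental sliding-window Counter maintenance by a brute-force scan over
-- window starts, recomputing the distinct flavors of each complement with set slices (simpler).

-- ===== PORT A =====
-- step of A's main loop, named so the proofs can speak about it (state: (count_unique, l, max_flavor))
def ufStep (candies : List Int) (k : Int)
    (st : PySem.Dict Int Int × Int × Int) (r : Int) : PySem.Dict Int Int × Int × Int :=
  let cu := st.1; let l := st.2.1; let mx := st.2.2
  let cu := cu.modify (PySem.List.pyGetD candies r 0) 0 (· - 1)
  let cu := if cu.getD (PySem.List.pyGetD candies r 0) 0 == 0
            then cu.erase (PySem.List.pyGetD candies r 0) else cu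
  let p := if r - l + 1 > k then
      (cu.modify (PySem.List.pyGetD candies l 0) 0 (· + 1), l + 1)
    else (cu, l)
  let mx := if r - p.2 + 1 == k then max mx (p.1.size : Int) else mx
  (p.1, p.2, mx)

def unique_flavors (candies : List Int) (k : Int) : Int :=
  let n : Int := (candies.length : Int)
  let count_unique : PySem.Dict Int Int :=
    (PySem.List.pyRange 0 n).foldl
      (fun d i => d.modify (PySem.List.pyGetD candies i 0) 0 (· + 1)) PySem.Dict.empty
  let st := (PySem.List.pyRange 0 n).foldl (ufStep candies k) (count_unique, 0, 0)
  st.2.2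

-- ===== PORT B =====
def unique_flavors_alt (candies : List Int) (k : Int) : Int :=
  let n : Int := (candies.length : Int)
  if k < 0 || k > n then 0
  else
    (PySem.List.pyRange 0 (n - k + 1)).foldl
      (fun best s =>
        let flavors := PySem.Set.union
          (PySem.Set.ofList (PySem.List.slice candies none (some s)))
          (PySem.List.slice candies (some (s + k)) none)
        max best (PySem.Set.len flavors)) 0

-- ===== PRECONDITION & SPEC =====
def Spec_unique_flavors (candies : List Int) (k : Int) (out : Int) : Prop := out = unique_flavors_alt candies k
instance (candies : List Int) (k : Int) (out : Int) : Decidable (Spec_unique_flavors candies k out) := by unfold Spec_unique_flavors; infer_instance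

-- ===== CLAIM (what is proved, stated in full; the proofs are below) =====
def Claim_equal_unique_flavors : Prop := ∀ (candies : List Int) (k : Int), Dom_unique_flavors candies k → Spec_unique_flavors candies k (unique_flavors candies k)

-- ===== LEMMAS AND PROOFS =====
theorem uf_find_erase (items : List (Int × Int)) (x y : Int) :
    (items.filter (fun p => !(p.1 == x))).find? (fun p => p.1 == y)
      = if y = x then none else items.find? (fun p => p.1 == y) := by
  induction items with
  | nil => simp
  | cons p t ih =>
    rw [List.filter_cons]
    by_cases hpx : p.1 = x
    · have hc : (!(p.1 == x)) = false := by simp [hpx]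
      rw [hc, if_neg (by simp), ih]
      by_cases hyx : y = x
      · simp [hyx]
      · have : (p.1 == y) = false := by simp only [hpx, beq_eq_false_iff_ne, ne_eq]; exact fun h => hyx h.symm
        rw [if_neg hyx, if_neg hyx, List.find?_cons, this]
    · have hc : (!(p.1 == x)) = true := by simp [hpx]
      rw [hc, if_pos rfl, List.find?_cons, List.find?_cons]
      by_cases hpy : p.1 = y
      · have : (p.1 == y) = true := by simp [hpy]
        rw [this]
        have hyx : ¬ y = x := fun h => hpx (hpy.trans h)
        simp [if_neg hyx]
      · have : (p.1 == y) = false := by simp [hpy]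
        rw [this, ih]

theorem uf_get?_erase (d : PySem.Dict Int Int) (x y : Int) :
    (d.erase x).get? y = if y = x then none else d.get? y := by
  show ((d.items.filter _).find? _).map _ = _
  rw [uf_find_erase]
  split <;> rfl

theorem uf_keys_erase (d : PySem.Dict Int Int) (x : Int) :
    (d.erase x).keys = d.keys.filter (fun z => !(z == x)) := by
  show (d.items.filter _).map _ = (d.items.map _).filter _
  rw [List.filter_map]
  rfl

theorem uf_getD_erase (d : PySem.Dict Int Int) (x y : Int) :
    (d.erase x).getD y 0 = if y = x then 0 else d.getD y 0 := by
  show ((d.erase x).get? y).getD 0 = _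
  rw [uf_get?_erase]
  split <;> rfl

theorem uf_remove (d : PySem.Dict Int Int) (C C' : List Int) (x : Int)
    (hC : ∀ y, (C.count y : Int) = (C'.count y : Int) + (if y = x then 1 else 0))
    (hcnt : ∀ y, d.getD y 0 = (C.count y : Int)) (hnd : d.keys.Nodup)
    (hmem : ∀ y, y ∈ d.keys ↔ y ∈ C) :
    (∀ y, (if (d.modify x 0 (· - 1)).getD x 0 == 0 then (d.modify x 0 (· - 1)).erase x
           else d.modify x 0 (· - 1)).getD y 0 = (C'.count y : Int)) ∧
    (if (d.modify x 0 (· - 1)).getD x 0 == 0 then (d.modify x 0 (· - 1)).erase x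
     else d.modify x 0 (· - 1)).keys.Nodup ∧
    (∀ y, y ∈ (if (d.modify x 0 (· - 1)).getD x 0 == 0 then (d.modify x 0 (· - 1)).erase x
               else d.modify x 0 (· - 1)).keys ↔ y ∈ C') := by
  have hCx : (C.count x : Int) = (C'.count x : Int) + 1 := by
    have := hC x; rw [if_pos rfl] at this; omega
  have hxC : x ∈ C := List.count_pos_iff.mp (by omega)
  have hCne : ∀ y, y ≠ x → (C.count y : Int) = (C'.count y : Int) := by
    intro y hy; have := hC y; rw [if_neg hy] at this; omega
  have hd1 : ∀ y, (d.modify x 0 (· - 1)).getD y 0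
      = if y = x then (C.count x : Int) - 1 else (C.count y : Int) := by
    intro y
    rw [PySem.Dict.getD_modify]
    by_cases hy : y = x
    · rw [if_pos hy, if_pos hy, hcnt]
    · rw [if_neg hy, if_neg hy, hcnt]
  have hk1 : (d.modify x 0 (· - 1)).keys = d.keys := by
    rw [PySem.Dict.keys_modify]
    exact PySem.Dict.keys_insert_of_contains d _ ((PySem.Dict.contains_iff_mem_keys d x).mpr ((hmem x).mpr hxC))
  by_cases hz : ((d.modify x 0 (· - 1)).getD x 0 == 0) = true
  · rw [if_pos hz]
    have hz' : (C.count x : Int) - 1 = 0 := by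
      have h := hd1 x; rw [if_pos rfl] at h; rw [h] at hz; simpa using hz
    have hC'x : (C'.count x : Int) = 0 := by omega
    refine ⟨?_, ?_, ?_⟩
    · intro y
      rw [uf_getD_erase]
      by_cases hy : y = x
      · rw [if_pos hy, hy]; omega
      · rw [if_neg hy, hd1 y, if_neg hy]; exact hCne y hy
    · rw [uf_keys_erase, hk1]; exact hnd.filter _
    · intro y
      rw [uf_keys_erase, hk1, List.mem_filter]
      by_cases hy : y = x
      · subst hy
        have : y ∉ C' := by
          intro hmem'
          have := List.count_pos_iff.mpr hmem'
          omega
        simp [this]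
      · have hcc := hCne y hy
        simp only [hmem y]
        constructor
        · rintro ⟨h1, _⟩
          have := List.count_pos_iff.mpr h1
          exact List.count_pos_iff.mp (by omega)
        · intro h1
          have := List.count_pos_iff.mpr h1
          exact ⟨List.count_pos_iff.mp (by omega), by simpa using hy⟩
  · rw [if_neg hz]
    have hz' : (C.count x : Int) - 1 ≠ 0 := by
      have h := hd1 x; rw [if_pos rfl] at h; rw [h] at hz; simpa using hz
    refine ⟨?_, ?_, ?_⟩
    · intro y
      rw [hd1 y]
      by_cases hy : y = x
      · rw [if_pos hy, hy]; omega
      · rw [if_neg hy]; exact hCne y hy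
    · rw [hk1]; exact hnd
    · intro y
      rw [hk1, hmem y]
      by_cases hy : y = x
      · subst hy
        have h2 : y ∈ C' := List.count_pos_iff.mp (by omega)
        simp [hxC, h2]
      · have hcc := hCne y hy
        constructor
        · intro h1
          have := List.count_pos_iff.mpr h1
          exact List.count_pos_iff.mp (by omega)
        · intro h1
          have := List.count_pos_iff.mpr h1
          exact List.count_pos_iff.mp (by omega)

theorem uf_add (d : PySem.Dict Int Int) (C C' : List Int) (y0 : Int)
    (hC : ∀ y, (C'.count y : Int) = (C.count y : Int) + (if y = y0 then 1 else 0))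
    (hcnt : ∀ y, d.getD y 0 = (C.count y : Int)) (hnd : d.keys.Nodup)
    (hmem : ∀ y, y ∈ d.keys ↔ y ∈ C) :
    (∀ y, (d.modify y0 0 (· + 1)).getD y 0 = (C'.count y : Int)) ∧
    (d.modify y0 0 (· + 1)).keys.Nodup ∧
    (∀ y, y ∈ (d.modify y0 0 (· + 1)).keys ↔ y ∈ C') := by
  have hCy0 : (C'.count y0 : Int) = (C.count y0 : Int) + 1 := by
    have := hC y0; rw [if_pos rfl] at this; omega
  have hCne : ∀ y, y ≠ y0 → (C'.count y : Int) = (C.count y : Int) := by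
    intro y hy; have := hC y; rw [if_neg hy] at this; omega
  have hy0 : y0 ∈ C' := List.count_pos_iff.mp (by omega)
  refine ⟨?_, ?_, ?_⟩
  · intro y
    rw [PySem.Dict.getD_modify]
    by_cases hy : y = y0
    · rw [if_pos hy, hy, hcnt]; omega
    · rw [if_neg hy, hcnt]; exact (hCne y hy).symm
  · rw [PySem.Dict.keys_modify]; exact PySem.Dict.nodup_keys_insert d _ _ hnd
  · intro y
    rw [PySem.Dict.keys_modify, PySem.Dict.mem_keys_insert]
    by_cases hy : y = y0
    · simp [hy, hy0]
    · have hcc := hCne y hy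
      rw [hmem y]
      simp only [hy, false_or]
      constructor
      · intro h1
        have := List.count_pos_iff.mpr h1
        exact List.count_pos_iff.mp (by omega)
      · intro h1
        have := List.count_pos_iff.mpr h1
        exact List.count_pos_iff.mp (by omega)

def ufD (cs : List Int) (kn r : Nat) : List Int := cs.take (r - kn) ++ cs.drop r

def ufInvD (cs : List Int) (kn r : Nat) (d : PySem.Dict Int Int) (l : Int) : Prop :=
  l = ((r - kn : Nat) : Int) ∧
  (∀ x, d.getD x 0 = ((ufD cs kn r).count x : Int)) ∧
  d.keys.Nodup ∧
  (∀ x, x ∈ d.keys ↔ x ∈ ufD cs kn r)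

theorem uf_len_eq {l1 l2 : List Int} (h1 : l1.Nodup) (h2 : l2.Nodup)
    (h : ∀ x, x ∈ l1 ↔ x ∈ l2) : l1.length = l2.length :=
  ((List.perm_ext_iff_of_nodup h1 h2).mpr h).length_eq

theorem uf_size_eq (d : PySem.Dict Int Int) (C : List Int) (hnd : d.keys.Nodup)
    (hmem : ∀ y, y ∈ d.keys ↔ y ∈ C) :
    (d.size : Int) = ((PySem.Set.ofList C).length : Int) := by
  have h1 : d.size = d.keys.length := by
    simp [PySem.Dict.size, PySem.Dict.keys]
  rw [h1, uf_len_eq hnd (PySem.Set.nodup_ofList C)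
    (fun y => (hmem y).trans (PySem.Set.mem_ofList C y).symm)]

theorem ufStep_invD (cs : List Int) (kn r : Nat) (hr : r < cs.length)
    (d : PySem.Dict Int Int) (l mx : Int) (h : ufInvD cs kn r d l) :
    ufInvD cs kn (r + 1) (ufStep cs (kn : Int) (d, l, mx) (r : Int)).1
      (ufStep cs (kn : Int) (d, l, mx) (r : Int)).2.1 ∧
    (ufStep cs (kn : Int) (d, l, mx) (r : Int)).2.2 =
      (if kn ≤ r + 1 then max mx ((PySem.Set.ofList (ufD cs kn (r + 1))).length : Int) else mx) := by
  obtain ⟨hl, hcnt, hnd, hmem⟩ := h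
  have hgetr : PySem.List.pyGetD cs (r : Int) 0 = cs[r] := by
    rw [PySem.List.pyGetD_natCast, List.getD_eq_getElem cs 0 hr]
  have hdropc : ∀ y : Int, (cs.drop r).count y = (cs.drop (r + 1)).count y + (if cs[r] == y then 1 else 0) := by
    intro y
    rw [List.drop_eq_getElem_cons hr, List.count_cons]
  have hCC' : ∀ y, ((ufD cs kn r).count y : Int)
      = ((cs.take (r - kn) ++ cs.drop (r + 1)).count y : Int) + (if y = cs[r] then 1 else 0) := by
    intro y
    unfold ufD
    rw [List.count_append, List.count_append, hdropc y]
    by_cases hy : y = cs[r] <;> simp [hy] <;> push_cast <;> omega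
  obtain ⟨h2cnt, h2nd, h2mem⟩ := uf_remove d (ufD cs kn r) (cs.take (r - kn) ++ cs.drop (r + 1))
    cs[r] hCC' hcnt hnd hmem
  simp only [ufStep, hgetr]
  by_cases hkr : kn ≤ r
  · -- window already full: l advances
    have hrkn : r - kn < cs.length := lt_of_le_of_lt (Nat.sub_le r kn) hr
    have hgetl : PySem.List.pyGetD cs l 0 = cs[r - kn] := by
      rw [hl, PySem.List.pyGetD_natCast, List.getD_eq_getElem cs 0 hrkn]
    have hcond : (r : Int) - l + 1 > (kn : Int) := by rw [hl]; omega
    rw [if_pos hcond]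
    have htake : cs.take (r + 1 - kn) = cs.take (r - kn) ++ [cs[r - kn]] := by
      have : r + 1 - kn = (r - kn) + 1 := by omega
      rw [this, List.take_succ, List.getElem?_eq_getElem hrkn]
      rfl
    have hadd : ∀ y, ((ufD cs kn (r + 1)).count y : Int)
        = ((cs.take (r - kn) ++ cs.drop (r + 1)).count y : Int) + (if y = cs[r - kn] then 1 else 0) := by
      intro y
      unfold ufD
      rw [htake, List.count_append, List.count_append, List.count_append, List.count_cons,
        List.count_nil]
      by_cases hy : y = cs[r - kn]
      · rw [if_pos hy]
        have hb : (cs[r - kn] == y) = true := by simp [hy]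
        rw [hb]
        simp
        push_cast
        ring
      · rw [if_neg hy]
        have hb : (cs[r - kn] == y) = false := by
          simp only [beq_eq_false_iff_ne, ne_eq]
          exact fun h => hy h.symm
        rw [hb]
        simp
    obtain ⟨h3cnt, h3nd, h3mem⟩ := uf_add _ _ (ufD cs kn (r + 1)) cs[r - kn] hadd h2cnt h2nd h2mem
    rw [hgetl]
    refine ⟨⟨by rw [hl]; omega, h3cnt, h3nd, h3mem⟩, ?_⟩
    have hc2 : (((r : Int) - (l + 1) + 1 == (kn : Int))) = true := by
      simp only [beq_iff_eq]; rw [hl]; omega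
    rw [hc2, if_pos rfl, if_pos (show kn ≤ r + 1 by omega), uf_size_eq _ _ h3nd h3mem]
  · -- window not yet full: l stays
    have hcond : ¬ ((r : Int) - l + 1 > (kn : Int)) := by rw [hl]; omega
    rw [if_neg hcond]
    have hD : ufD cs kn (r + 1) = cs.take (r - kn) ++ cs.drop (r + 1) := by
      unfold ufD
      rw [Nat.sub_eq_zero_of_le (by omega), Nat.sub_eq_zero_of_le (by omega)]
    refine ⟨⟨by rw [hl]; rw [Nat.sub_eq_zero_of_le (by omega), Nat.sub_eq_zero_of_le (by omega)],
      by rw [hD]; exact h2cnt, h2nd, by rw [hD]; exact h2mem⟩, ?_⟩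
    rcases Nat.lt_or_ge (r + 1) kn with hk2 | hk2
    · have hc2 : (((r : Int) - l + 1 == (kn : Int))) = false := by
        simp only [beq_eq_false_iff_ne, ne_eq]; rw [hl]; omega
      rw [hc2, if_neg (show ¬ (false = true) by simp), if_neg (show ¬ kn ≤ r + 1 by omega)]
    · have hkeq : r + 1 = kn := by omega
      have hc2 : (((r : Int) - l + 1 == (kn : Int))) = true := by
        simp only [beq_iff_eq]; rw [hl]; omega
      rw [hc2, if_pos rfl, if_pos (show kn ≤ r + 1 by omega), uf_size_eq _ _ h2nd h2mem, hD]

def ufVal (cs : List Int) (k s : Int) : Int :=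
  PySem.Set.len (PySem.Set.union
    (PySem.Set.ofList (PySem.List.slice cs none (some s)))
    (PySem.List.slice cs (some (s + k)) none))

def ufB (cs : List Int) (k m : Int) : Int :=
  (PySem.List.pyRange 0 m).foldl (fun best s => max best (ufVal cs k s)) 0

def ufLoop (cs : List Int) (k : Int) (r : Nat) : PySem.Dict Int Int × Int × Int :=
  (PySem.List.pyRange 0 (r : Int)).foldl (ufStep cs k) (PySem.Dict.counter cs, 0, 0)

theorem ufLoop_zero (cs : List Int) (k : Int) : ufLoop cs k 0 = (PySem.Dict.counter cs, 0, 0) := by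
  unfold ufLoop
  rw [PySem.List.pyRange_one_eq_nil (by omega)]
  rfl

theorem ufLoop_succ (cs : List Int) (k : Int) (r : Nat) :
    ufLoop cs k (r + 1) = ufStep cs k (ufLoop cs k r) (r : Int) := by
  unfold ufLoop
  rw [show ((r + 1 : Nat) : Int) = (r : Int) + 1 by push_cast; ring,
    PySem.List.pyRange_one_succ_right (by omega), List.foldl_append]
  rfl

theorem ufB_succ (cs : List Int) (k b : Int) (hb : 0 ≤ b) :
    ufB cs k (b + 1) = max (ufB cs k b) (ufVal cs k b) := by
  unfold ufB
  rw [PySem.List.pyRange_one_succ_right (by omega), List.foldl_append]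
  rfl

theorem ufB_nonpos (cs : List Int) (k m : Int) (hm : m ≤ 0) : ufB cs k m = 0 := by
  unfold ufB
  rw [PySem.List.pyRange_one_eq_nil (by omega)]
  rfl

theorem ufVal_eq (cs : List Int) (k s : Int) (hs : 0 ≤ s) (hsk : 0 ≤ s + k) :
    ufVal cs k s = ((PySem.Set.ofList (cs.take s.toNat ++ cs.drop (s + k).toNat)).length : Int) := by
  unfold ufVal
  rw [PySem.List.slice_to cs hs, PySem.List.slice_from cs hsk]
  show ((PySem.Set.update _ _).length : Int) = _
  rw [uf_len_eq (PySem.Set.nodup_update _ _ (PySem.Set.nodup_ofList _))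
    (PySem.Set.nodup_ofList _) ?_]
  intro x
  rw [PySem.Set.mem_update, PySem.Set.mem_ofList, PySem.Set.mem_ofList, List.mem_append]

theorem ufLoop_main (cs : List Int) (kn : Nat) (hk : 1 ≤ kn) :
    ∀ r : Nat, r ≤ cs.length →
      ufInvD cs kn r (ufLoop cs (kn : Int) r).1 (ufLoop cs (kn : Int) r).2.1 ∧
      (ufLoop cs (kn : Int) r).2.2 = ufB cs (kn : Int) ((r : Int) - kn + 1) := by
  intro r
  induction r with
  | zero =>
    intro _
    rw [ufLoop_zero]
    refine ⟨⟨by simp, ?_, ?_, ?_⟩, ?_⟩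
    · intro x
      rw [PySem.Dict.getD_counter]
      unfold ufD
      simp
    · rw [PySem.Dict.keys_counter]; exact PySem.Set.nodup_ofList cs
    · intro x
      rw [PySem.Dict.keys_counter, PySem.Set.mem_ofList]
      unfold ufD
      simp
    · rw [ufB_nonpos cs _ _ (by omega)]
  | succ r ih =>
    intro hr1
    have hr : r < cs.length := by omega
    obtain ⟨hInv, hmx⟩ := ih (by omega)
    have hsplit : ufLoop cs (kn : Int) r
        = ((ufLoop cs (kn : Int) r).1, (ufLoop cs (kn : Int) r).2.1, (ufLoop cs (kn : Int) r).2.2) := rfl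
    have hstep := ufStep_invD cs kn r hr (ufLoop cs (kn : Int) r).1 (ufLoop cs (kn : Int) r).2.1
      (ufLoop cs (kn : Int) r).2.2 hInv
    rw [← hsplit] at hstep
    rw [ufLoop_succ]
    refine ⟨hstep.1, ?_⟩
    rw [hstep.2, hmx]
    by_cases hc : kn ≤ r + 1
    · rw [if_pos hc]
      have h1 : ((r : Int) + 1) - kn + 1 = ((r : Int) - kn + 1) + 1 := by ring
      rw [show ((r + 1 : Nat) : Int) = (r : Int) + 1 by push_cast; ring, h1,
        ufB_succ cs (kn : Int) ((r : Int) - kn + 1) (by omega)]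
      congr 1
      rw [ufVal_eq cs (kn : Int) ((r : Int) - kn + 1) (by omega) (by omega),
        show ((r : Int) - kn + 1).toNat = r + 1 - kn by omega,
        show ((r : Int) - kn + 1 + kn).toNat = r + 1 by omega]
      unfold ufD
      rfl
    · rw [if_neg hc]
      rw [ufB_nonpos cs (kn : Int) ((r : Int) - kn + 1) (by omega),
        ufB_nonpos cs (kn : Int) (((r + 1 : Nat) : Int) - kn + 1) (by push_cast; omega)]

theorem ufD_k0 (cs : List Int) (m : Nat) : ufD cs 0 m = cs := by
  unfold ufD
  rw [Nat.sub_zero, List.take_append_drop]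

theorem ufLoop_k0 (cs : List Int) :
    ∀ r : Nat, r ≤ cs.length →
      ufInvD cs 0 r (ufLoop cs 0 r).1 (ufLoop cs 0 r).2.1 ∧
      (ufLoop cs 0 r).2.2 = (if r = 0 then 0 else ((PySem.Set.ofList cs).length : Int)) := by
  intro r
  induction r with
  | zero =>
    intro _
    rw [ufLoop_zero]
    refine ⟨⟨by simp, ?_, ?_, ?_⟩, rfl⟩
    · intro x
      rw [PySem.Dict.getD_counter, ufD_k0]
    · rw [PySem.Dict.keys_counter]; exact PySem.Set.nodup_ofList cs
    · intro x
      rw [PySem.Dict.keys_counter, PySem.Set.mem_ofList, ufD_k0]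
  | succ r ih =>
    intro hr1
    have hr : r < cs.length := by omega
    obtain ⟨hInv, hmx⟩ := ih (by omega)
    have hsplit : ufLoop cs 0 r
        = ((ufLoop cs 0 r).1, (ufLoop cs 0 r).2.1, (ufLoop cs 0 r).2.2) := rfl
    have hstep := ufStep_invD cs 0 r hr (ufLoop cs 0 r).1 (ufLoop cs 0 r).2.1
      (ufLoop cs 0 r).2.2 hInv
    rw [← hsplit] at hstep
    simp only [Nat.cast_zero] at hstep
    rw [ufLoop_succ]
    refine ⟨hstep.1, ?_⟩
    rw [hstep.2, hmx, if_pos (show (0 : Nat) ≤ r + 1 by omega), ufD_k0]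
    have hnn : (0 : Int) ≤ ((PySem.Set.ofList cs).length : Int) := Int.natCast_nonneg _
    by_cases h0 : r = 0
    · rw [if_pos h0, if_neg (show ¬ r + 1 = 0 by omega)]
      exact max_eq_right hnn
    · rw [if_neg h0, if_neg (show ¬ r + 1 = 0 by omega)]
      exact max_self _

theorem ufLoop_neg (cs : List Int) (k : Int) (hk : k < 0) :
    ∀ r : Nat, (ufLoop cs k r).2.1 = (r : Int) ∧ (ufLoop cs k r).2.2 = 0 := by
  intro r
  induction r with
  | zero => rw [ufLoop_zero]; exact ⟨rfl, rfl⟩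
  | succ r ih =>
    obtain ⟨hl, hm⟩ := ih
    rw [ufLoop_succ]
    simp only [ufStep, hl, hm]
    rw [if_pos (show (r : Int) - (r : Int) + 1 > k by omega)]
    rw [show (((r : Int) - ((r : Int) + 1) + 1 == k)) = false by
      simp only [beq_eq_false_iff_ne, ne_eq]; omega]
    exact ⟨by push_cast; ring, rfl⟩

theorem ufLoop_big (cs : List Int) (k : Int) (hk : (cs.length : Int) < k) :
    ∀ r : Nat, r ≤ cs.length → (ufLoop cs k r).2.1 = 0 ∧ (ufLoop cs k r).2.2 = 0 := by
  intro r
  induction r with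
  | zero => intro _; rw [ufLoop_zero]; exact ⟨rfl, rfl⟩
  | succ r ih =>
    intro hr1
    obtain ⟨hl, hm⟩ := ih (by omega)
    have hr : (r : Int) + 1 ≤ (cs.length : Int) := by push_cast; omega
    rw [ufLoop_succ]
    simp only [ufStep, hl, hm]
    rw [if_neg (show ¬ ((r : Int) - 0 + 1 > k) by omega)]
    rw [show (((r : Int) - 0 + 1 == k)) = false by
      simp only [beq_eq_false_iff_ne, ne_eq]; omega]
    exact ⟨rfl, rfl⟩

theorem ufB_k0 (cs : List Int) :
    ∀ m : Nat, m ≤ cs.length → ufB cs 0 ((m : Int) + 1) = ((PySem.Set.ofList cs).length : Int) := by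
  intro m
  induction m with
  | zero =>
    intro _
    rw [show ((0 : Nat) : Int) + 1 = 0 + 1 by ring, ufB_succ cs 0 0 le_rfl,
      ufB_nonpos cs 0 0 le_rfl, ufVal_eq cs 0 0 le_rfl (by omega)]
    have h1 : cs.take ((0 : Int)).toNat ++ cs.drop ((0 + 0 : Int)).toNat = cs := by simp
    rw [h1]
    have hnn : (0 : Int) ≤ ((PySem.Set.ofList cs).length : Int) := Int.natCast_nonneg _
    omega
  | succ m ih =>
    intro hm1
    rw [show ((m + 1 : Nat) : Int) + 1 = ((m : Int) + 1) + 1 by push_cast; ring,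
      ufB_succ cs 0 ((m : Int) + 1) (by omega), ih (by omega),
      ufVal_eq cs 0 ((m : Int) + 1) (by omega) (by omega)]
    have h1 : ((PySem.Set.ofList (cs.take ((m : Int) + 1).toNat ++ cs.drop ((m : Int) + 1 + 0).toNat)).length : Int)
        = ((PySem.Set.ofList cs).length : Int) := by
      have := uf_len_eq (PySem.Set.nodup_ofList (cs.take ((m : Int) + 1).toNat ++ cs.drop ((m : Int) + 1 + 0).toNat))
        (PySem.Set.nodup_ofList cs) ?_
      · rw [this]
      · intro x
        rw [PySem.Set.mem_ofList, PySem.Set.mem_ofList,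
          show ((m : Int) + 1 + 0) = (m : Int) + 1 by ring, List.take_append_drop]
    rw [h1, max_self]

theorem uf_A_eq (cs : List Int) (k : Int) :
    unique_flavors cs k = (ufLoop cs k cs.length).2.2 := by
  show ((PySem.List.pyRange 0 (cs.length : Int)).foldl (ufStep cs k)
    ((PySem.List.pyRange 0 (cs.length : Int)).foldl
      (fun d i => d.modify (PySem.List.pyGetD cs i 0) 0 (· + 1)) PySem.Dict.empty, 0, 0)).2.2 = _
  have h1 : (PySem.List.pyRange 0 (cs.length : Int)).foldl
      (fun d i => d.modify (PySem.List.pyGetD cs i 0) 0 (· + 1)) PySem.Dict.empty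
      = PySem.Dict.counter cs :=
    (PySem.List.foldl_pyRange_zero_pyGetD' cs 0 (fun (d : PySem.Dict Int Int) (x : Int) => d.modify x 0 (· + 1)) PySem.Dict.empty).trans
      (PySem.Dict.counter_eq_foldl cs).symm
  rw [h1]
  rfl

theorem uf_B_eq (cs : List Int) (k : Int) (h0 : 0 ≤ k) (hn : k ≤ (cs.length : Int)) :
    unique_flavors_alt cs k = ufB cs k ((cs.length : Int) - k + 1) := by
  simp only [unique_flavors_alt]
  rw [if_neg (show ¬ ((k < 0 || k > (cs.length : Int)) = true) by
    simp only [Bool.or_eq_true, decide_eq_true_eq]; omega)]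
  rfl

theorem uf_AB (cs : List Int) (k : Int) : unique_flavors cs k = unique_flavors_alt cs k := by
  by_cases hneg : k < 0
  · rw [uf_A_eq, (ufLoop_neg cs k hneg cs.length).2]
    simp only [unique_flavors_alt]
    rw [if_pos (show (k < 0 || k > (cs.length : Int)) = true by
      simp only [Bool.or_eq_true, decide_eq_true_eq]; omega)]
  · by_cases hbig : (cs.length : Int) < k
    · rw [uf_A_eq, (ufLoop_big cs k hbig cs.length le_rfl).2]
      simp only [unique_flavors_alt]
      rw [if_pos (show (k < 0 || k > (cs.length : Int)) = true by
        simp only [Bool.or_eq_true, decide_eq_true_eq]; omega)]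
    · have h0 : 0 ≤ k := by omega
      have hn : k ≤ (cs.length : Int) := by omega
      rw [uf_B_eq cs k h0 hn, uf_A_eq]
      by_cases hz : k = 0
      · subst hz
        rw [(ufLoop_k0 cs cs.length le_rfl).2,
          show (cs.length : Int) - 0 + 1 = (cs.length : Int) + 1 by ring,
          ufB_k0 cs cs.length le_rfl]
        by_cases hl0 : cs.length = 0
        · rw [if_pos hl0]
          have hnil : cs = [] := List.length_eq_zero_iff.mp hl0
          subst hnil
          rfl
        · rw [if_neg hl0]
      · have hk1 : 1 ≤ k.toNat := by omega
        have hkk : k = (k.toNat : Int) := (Int.toNat_of_nonneg h0).symm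
        rw [hkk, (ufLoop_main cs k.toNat hk1 cs.length le_rfl).2]

-- ===== VERDICT (by name: the statement is the Claim_ definition above) =====
theorem unique_flavors_spec : Claim_equal_unique_flavors := by
  intro candies k _
  exact uf_AB candies k
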